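-- pv_equiv track=rewrite | github.com/ada01325150-alt/private-skill | wechat-official-search-focus/scripts/wechat_dialectic_matrix.py | match_focus_accounts
-- ===== SOURCE A (Python) =====
-- from typing import Dict, List
--
-- def match_focus_accounts(account_name: str, title: str, text: str, focus_accounts: List[str]) -> List[str]:
--     merged = " ".join([account_name or "", title or "", text or ""])
--     hits: List[str] = []
--     seen = set()
--     for name in focus_accounts:
--         if name and name in merged and name not in seen:
--             seen.add(name)
--             hits.append(name)
--     return hits
-- ===== SOURCE B (Python) =====
-- from typing import List
--
-- def match_focus_accounts(account_name: str, title: str, text: str, focus_accounts: List[str]) -> List[str]: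
--     merged = " ".join([account_name or "", title or "", text or ""])
--     windows = {}  # pattern length -> set of all substrings of merged of that length
--     hits: List[str] = []
--     for name in dict.fromkeys(focus_accounts):  # first occurrences, in order
--         if not name:
--             continue
--         L = len(name)
--         ws = windows.get(L)
--         if ws is None:
--             ws = {merged[i:i + L] for i in range(len(merged) - L + 1)}
--             windows[L] = ws
--         if name in ws:
--             hits.append(name)
--     return hits
-- ===== Notes on version B (the rewrite author's own statement) =====
-- stated objective: faster
-- what changed: Instead of running a separate substring scan of the merged text for every focus name, B dedups the names once (dict.fromkeys) and, per distinct name length L, builds a hash set of all length-L windows of the merged text once, answering each name by one set lookup.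
import Mathlib
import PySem

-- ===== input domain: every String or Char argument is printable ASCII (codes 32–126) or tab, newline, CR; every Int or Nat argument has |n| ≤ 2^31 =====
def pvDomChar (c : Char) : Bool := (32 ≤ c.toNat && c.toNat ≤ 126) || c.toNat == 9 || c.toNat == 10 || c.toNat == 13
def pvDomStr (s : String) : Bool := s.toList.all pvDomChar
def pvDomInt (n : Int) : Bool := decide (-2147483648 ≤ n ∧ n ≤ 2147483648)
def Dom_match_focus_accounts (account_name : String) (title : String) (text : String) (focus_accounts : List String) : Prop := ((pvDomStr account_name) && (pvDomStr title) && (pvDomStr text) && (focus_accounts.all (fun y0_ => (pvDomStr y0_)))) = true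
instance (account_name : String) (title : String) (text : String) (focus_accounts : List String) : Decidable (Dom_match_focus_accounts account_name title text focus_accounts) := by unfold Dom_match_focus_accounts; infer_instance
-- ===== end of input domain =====

-- B replaces A's per-name substring scan of the merged text by a once-per-distinct-length
-- hash set of all fixed-length windows of the merged text, over the dedup'd name list (objective: faster).

-- ===== PORT A =====
-- loop body of A: if name and name in merged and name not in seen: seen.add(name); hits.append(name)
def pvStepA (merged : String) (st : List String × PySem.Set String) (name : String) :
    List String × PySem.Set String :=
  if (name != "") && PySem.Str.isIn name merged && !(PySem.Set.contains st.2 name) then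
    (st.1 ++ [name], PySem.Set.add st.2 name)
  else st

def match_focus_accounts (account_name : String) (title : String) (text : String) (focus_accounts : List String) : List String :=
  -- merged = " ".join([account_name or "", title or "", text or ""]); on str, `x or ""` is x if x ≠ "" else ""
  let merged := PySem.Str.join " " [(if account_name == "" then "" else account_name),
                                    (if title == "" then "" else title),
                                    (if text == "" then "" else text)]
  (focus_accounts.foldl (pvStepA merged) ([], PySem.Set.empty)).1

-- ===== PORT B =====
-- {merged[i:i+L] for i in range(len(merged) - L + 1)}
def pvWindows (merged : String) (L : Int) : PySem.Set String :=
  PySem.Set.ofList ((PySem.List.pyRange 0 (PySem.Str.len merged - L + 1) 1).map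
    (fun i => PySem.Str.slice merged (some i) (some (i + L))))

-- loop body of B: skip empty names, fetch/build the window set for len(name), one set lookup
def pvStepB (merged : String) (st : PySem.Dict Int (PySem.Set String) × List String) (name : String) :
    PySem.Dict Int (PySem.Set String) × List String :=
  if name == "" then st
  else
    match PySem.Dict.get? st.1 (PySem.Str.len name) with
    | some ws => (st.1, if PySem.Set.contains ws name then st.2 ++ [name] else st.2)
    | none =>
        let ws := pvWindows merged (PySem.Str.len name)
        (st.1.insert (PySem.Str.len name) ws,
         if PySem.Set.contains ws name then st.2 ++ [name] else st.2)

def match_focus_accounts_alt (account_name : String) (title : String) (text : String) (focus_accounts : List String) : List String :=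
  let merged := PySem.Str.join " " [(if account_name == "" then "" else account_name),
                                    (if title == "" then "" else title),
                                    (if text == "" then "" else text)]
  ((PySem.List.dedup focus_accounts).foldl (pvStepB merged) (PySem.Dict.empty, [])).2

-- ===== PRECONDITION & SPEC =====
def Spec_match_focus_accounts (account_name : String) (title : String) (text : String) (focus_accounts : List String) (out : List String) : Prop := out = match_focus_accounts_alt account_name title text focus_accounts
instance (account_name : String) (title : String) (text : String) (focus_accounts : List String) (out : List String) : Decidable (Spec_match_focus_accounts account_name title text focus_accounts out) := by unfold Spec_match_focus_accounts; infer_instance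

-- ===== CLAIM (what is proved, stated in full; the proofs are below) =====
def Claim_equal_match_focus_accounts : Prop := ∀ (account_name : String) (title : String) (text : String) (focus_accounts : List String), Dom_match_focus_accounts account_name title text focus_accounts → Spec_match_focus_accounts account_name title text focus_accounts (match_focus_accounts account_name title text focus_accounts)

-- ===== LEMMAS AND PROOFS =====

-- the Boolean test both programs decide per name: nonempty and a substring of merged
def pvP (merged n : String) : Bool := (n != "") && PySem.Str.isIn n merged

-- A's loop with the seen-set collapsed into the hit list (seen always equals hits)
def pvG (merged : String) (acc : List String) (n : String) : List String :=
  if pvP merged n && !(PySem.Set.contains acc n) then acc ++ [n] else acc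

-- window-set membership IS the substring test
lemma pvWindows_mem (m n : String) :
    PySem.Set.contains (pvWindows m (PySem.Str.len n)) n = PySem.Str.isIn n m := by
  have key : n ∈ pvWindows m (PySem.Str.len n) ↔ n.toList <:+: m.toList := by
    constructor
    · intro h
      rw [pvWindows, PySem.Set.mem_ofList, List.mem_map] at h
      obtain ⟨i, hi, hs⟩ := h
      rw [PySem.List.mem_pyRange_one] at hi
      have h0 : (0:Int) ≤ i := hi.1
      have hL : (0:Int) ≤ i + PySem.Str.len n := by
        have := PySem.Str.len_eq n; omega
      have hlist := congrArg String.toList hs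
      rw [PySem.Str.toList_slice, PySem.Chars.slice_eq_listSlice,
        PySem.List.slice_toNat m.toList h0 hL] at hlist
      rw [← hlist]
      exact (List.take_prefix _ _).isInfix.trans (List.drop_suffix _ _).isInfix
    · intro h
      obtain ⟨s, t, hm⟩ := h
      rw [pvWindows, PySem.Set.mem_ofList, List.mem_map]
      refine ⟨(s.length : Int), ?_, ?_⟩
      · rw [PySem.List.mem_pyRange_one]
        have hlm := PySem.Str.len_eq m
        have hln := PySem.Str.len_eq n
        have : m.toList.length = s.length + n.toList.length + t.length := by
          rw [← hm]; simp; omega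
        omega
      · rw [← String.toList_inj, PySem.Str.toList_slice, PySem.Chars.slice_eq_listSlice]
        have hln := PySem.Str.len_eq n
        have h0 : (0:Int) ≤ (s.length : Int) := by positivity
        have hL : (0:Int) ≤ (s.length : Int) + PySem.Str.len n := by omega
        rw [PySem.List.slice_toNat m.toList h0 hL]
        simp only [Int.toNat_natCast]
        have htn : ((s.length : Int) + PySem.Str.len n).toNat - s.length = n.toList.length := by
          omega
        rw [htn, ← hm]
        rw [show s ++ n.toList ++ t = s ++ (n.toList ++ t) by simp]
        rw [List.drop_left, List.take_left]
  have h1 : PySem.Set.contains (pvWindows m (PySem.Str.len n)) n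
      = decide (n ∈ pvWindows m (PySem.Str.len n)) := by
    simp [PySem.Set.contains]
  rw [h1]
  cases hb : PySem.Str.isIn n m with
  | true => exact decide_eq_true (key.mpr ((PySem.Str.isIn_iff_infix n m).mp hb))
  | false =>
      refine decide_eq_false (fun hc => ?_)
      rw [(PySem.Str.isIn_iff_infix n m).mpr (key.mp hc)] at hb
      cases hb

-- A's paired (hits, seen) state runs in lock-step with pvG on a single list
lemma pvA_pair (merged : String) (l : List String) (h : List String) :
    l.foldl (pvStepA merged) (h, h) = (l.foldl (pvG merged) h, l.foldl (pvG merged) h) := by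
  induction l generalizing h with
  | nil => rfl
  | cons n t ih =>
    simp only [List.foldl_cons]
    by_cases hc : (pvP merged n && !(PySem.Set.contains h n)) = true
    · have hcon : PySem.Set.contains h n = false := by
        revert hc
        cases hx : PySem.Set.contains h n <;> simp
      have hmem : n ∉ h := by simpa [PySem.Set.contains] using hcon
      have hadd : PySem.Set.add h n = h ++ [n] := by
        simp [PySem.Set.add, PySem.Set.contains, hmem]
      have hstep : pvStepA merged (h, h) n = (h ++ [n], h ++ [n]) := by
        simp only [pvStepA, pvP] at hc ⊢
        rw [if_pos (by simpa [Bool.and_assoc] using hc), hadd]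
      have hg : pvG merged h n = h ++ [n] := by
        simp only [pvG]
        rw [if_pos hc]
      rw [hstep, hg, ih]
    · have hstep : pvStepA merged (h, h) n = (h, h) := by
        simp only [pvStepA, pvP] at hc ⊢
        rw [if_neg (by simpa [Bool.and_assoc] using hc)]
      have hg : pvG merged h n = h := by
        simp only [pvG]
        rw [if_neg hc]
      rw [hstep, hg, ih]

-- the membership-checked accumulation over l equals a plain filter over the dedup of l
lemma pvA_main (merged : String) (l : List String) (s : List String) :
    l.foldl (pvG merged) (s.filter (pvP merged ·)) = (l.foldl PySem.Set.add s).filter (pvP merged ·) := by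
  induction l generalizing s with
  | nil => rfl
  | cons n t ih =>
    simp only [List.foldl_cons]
    by_cases hns : n ∈ s
    · have hadd : PySem.Set.add s n = s := by
        simp [PySem.Set.add, PySem.Set.contains, hns]
      by_cases hp : pvP merged n = true
      · have hg : pvG merged (s.filter (pvP merged ·)) n = s.filter (pvP merged ·) := by
          have : n ∈ s.filter (pvP merged ·) := List.mem_filter.mpr ⟨hns, hp⟩
          simp [pvG, PySem.Set.contains, this]
        rw [hg, hadd, ih]
      · have hg : pvG merged (s.filter (pvP merged ·)) n = s.filter (pvP merged ·) := by
          simp [pvG, hp]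
        rw [hg, hadd, ih]
    · have hadd : PySem.Set.add s n = s ++ [n] := by
        simp [PySem.Set.add, PySem.Set.contains, hns]
      by_cases hp : pvP merged n = true
      · have hg : pvG merged (s.filter (pvP merged ·)) n = s.filter (pvP merged ·) ++ [n] := by
          have hni : n ∉ s.filter (pvP merged ·) := fun hc => hns (List.mem_filter.mp hc).1
          simp [pvG, PySem.Set.contains, hni, hp]
        rw [hg, hadd, show (s.filter (pvP merged ·)) ++ [n] = (s ++ [n]).filter (pvP merged ·) by
          simp [List.filter_append, hp], ih]
      · have hg : pvG merged (s.filter (pvP merged ·)) n = s.filter (pvP merged ·) := by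
          simp [pvG, hp]
        rw [hg, hadd, show (s.filter (pvP merged ·)) = (s ++ [n]).filter (pvP merged ·) by
          simp [List.filter_append, hp], ih]

-- B's cached-windows loop equals the same plain filter, for any dict whose entries are window sets
lemma pvB_gen (merged : String) (l : List String) (d : PySem.Dict Int (PySem.Set String)) (h : List String)
    (hd : ∀ k w, PySem.Dict.get? d k = some w → w = pvWindows merged k) :
    (l.foldl (pvStepB merged) (d, h)).2 = h ++ l.filter (pvP merged ·) := by
  induction l generalizing d h with
  | nil => simp
  | cons n t ih =>
    simp only [List.foldl_cons]
    by_cases hn : n = ""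
    · have hstep : pvStepB merged (d, h) n = (d, h) := by simp [pvStepB, hn]
      have hp : pvP merged n = false := by simp [pvP, hn]
      rw [hstep, ih d h hd, List.filter_cons, hp]
      simp
    · have hp : pvP merged n = PySem.Str.isIn n merged := by simp [pvP, hn]
      cases hget : PySem.Dict.get? d (PySem.Str.len n) with
      | some ws =>
        have hws : ws = pvWindows merged (PySem.Str.len n) := hd _ _ hget
        have hget' : d.get? ((n.length : Int)) = some ws := by simpa using hget
        have hkey : (n ∈ ws) ↔ pvP merged n = true := by
          have h1 := pvWindows_mem merged n
          rw [← hws] at h1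
          have h2 : decide (n ∈ ws) = PySem.Str.isIn n merged := by
            simpa [PySem.Set.contains] using h1
          rw [hp, ← h2]; simp
        have hstep : pvStepB merged (d, h) n = (d, if pvP merged n then h ++ [n] else h) := by
          by_cases hq : pvP merged n = true
          · simp [pvStepB, hn, hget', hkey.mpr hq, hq]
          · have hni : ¬ n ∈ ws := fun hc => hq (hkey.mp hc)
            simp [pvStepB, hn, hget', hni, hq]
        rw [hstep, ih d _ hd, List.filter_cons]
        by_cases hq : pvP merged n = true <;> simp [hq]
      | none =>
        have hget' : d.get? ((n.length : Int)) = none := by simpa using hget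
        have hlen : ((n.length : Int)) = PySem.Str.len n := by simp [PySem.Str.len_eq]
        have hkey : (n ∈ pvWindows merged ((n.length : Int))) ↔ pvP merged n = true := by
          have h1 := pvWindows_mem merged n
          have h2 : decide (n ∈ pvWindows merged (PySem.Str.len n)) = PySem.Str.isIn n merged := by
            simpa [PySem.Set.contains] using h1
          rw [hp, hlen, ← h2]; simp
        have hstep : pvStepB merged (d, h) n
            = (d.insert ((n.length : Int)) (pvWindows merged ((n.length : Int))),
               if pvP merged n then h ++ [n] else h) := by
          by_cases hq : pvP merged n = true
          · simp [pvStepB, hn, hget', hkey.mpr hq, hq]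
          · have hni : ¬ n ∈ pvWindows merged ((n.length : Int)) := fun hc => hq (hkey.mp hc)
            simp [pvStepB, hn, hget', hni, hq]
        have hd' : ∀ k w, PySem.Dict.get? (d.insert ((n.length : Int)) (pvWindows merged ((n.length : Int)))) k = some w → w = pvWindows merged k := by
          intro k w hkw
          rw [PySem.Dict.get?_insert] at hkw
          by_cases hk : k = ((n.length : Int))
          · rw [if_pos hk] at hkw; cases hkw; rw [hk]
          · rw [if_neg hk] at hkw; exact hd _ _ hkw
        rw [hstep, ih _ _ hd', List.filter_cons]
        by_cases hq : pvP merged n = true <;> simp [hq]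

-- ===== VERDICT (by name: the statement is the Claim_ definition above) =====
theorem match_focus_accounts_spec : Claim_equal_match_focus_accounts := by
  intro account_name title text focus_accounts _
  unfold Spec_match_focus_accounts match_focus_accounts match_focus_accounts_alt
  set merged := PySem.Str.join " " [(if account_name == "" then "" else account_name),
                                    (if title == "" then "" else title),
                                    (if text == "" then "" else text)] with hm
  have hA : (focus_accounts.foldl (pvStepA merged) ([], PySem.Set.empty)).1
      = (PySem.Set.ofList focus_accounts).filter (pvP merged ·) := by
    have he : (([], PySem.Set.empty) : List String × PySem.Set String) = ([], ([] : List String)) := rfl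
    rw [he, pvA_pair merged focus_accounts []]
    have := pvA_main merged focus_accounts []
    simpa [PySem.Set.ofList, PySem.Set.empty] using this
  have hB : ((PySem.List.dedup focus_accounts).foldl (pvStepB merged) (PySem.Dict.empty, [])).2
      = (PySem.Set.ofList focus_accounts).filter (pvP merged ·) := by
    have hd : ∀ k w, PySem.Dict.get? (PySem.Dict.empty : PySem.Dict Int (PySem.Set String)) k = some w → w = pvWindows merged k := by
      intro k w hkw
      simp [PySem.Dict.empty, PySem.Dict.get?] at hkw
    rw [pvB_gen merged _ _ _ hd]
    simp [PySem.List.dedup]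
  rw [hA, hB]
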